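-- pv_equiv track=rewrite | github.com/arxaqapi/licence-info | S2/theorieDeLinformation/LZW/lzw.py | compress_lim
-- ===== SOURCE A (Python) =====
-- alpha_small = False
--
-- alpha_size = 128
--
-- dict_size = 256
--
-- def init_dict():  # ex1
--     dico = {}
--     start = 'a'
--     if not alpha_small:
--         start = '\x00'
--     for i in range(alpha_size):
--         dico[chr(ord(start) + i)] = i
--     return dico
--
-- def compress_lim(st):  # ex8
--     compr = []
--     dico = init_dict()
--     motPartiel = ""
--     for c in st:
--         if (motPartiel + c) in dico:
--             motPartiel += c
--         else:
--             compr.append(dico[motPartiel])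
--
--             if len(dico) <= dict_size:
--                 dico[motPartiel + c] = len(dico)
--
--             motPartiel = c
--     compr.append(dico[motPartiel])
--     return compr
-- ===== SOURCE B (Python) =====
-- def compress_lim(st):
--     # Trie-based LZW: states are codes; edges beyond the 128 implicit root
--     # children live in `children`, keyed by (prefix code, char code).
--     children = {}
--     next_code = 128
--     out = []
--     cur = -1  # -1 = root (empty prefix)
--     for c in st:
--         ch = ord(c)
--         nxt = ch if (cur == -1 and ch < 128) else children.get((cur, ch))
--         if nxt is not None:
--             cur = nxt
--         else:
--             out.append(cur)
--             if next_code <= 256: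
--                 children[(cur, ch)] = next_code
--                 next_code += 1
--             cur = ch
--     if cur != -1:
--         out.append(cur)
--     return out
-- ===== Notes on version B (the rewrite author's own statement) =====
-- stated objective: alternative
-- what changed: Replaces the string-keyed dictionary (prefix-string concatenation and string membership tests per character) by an explicit trie of integer codes: the current prefix is a single code, edges are keyed by (prefix code, char code), so no strings are built or hashed.
import Mathlib
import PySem

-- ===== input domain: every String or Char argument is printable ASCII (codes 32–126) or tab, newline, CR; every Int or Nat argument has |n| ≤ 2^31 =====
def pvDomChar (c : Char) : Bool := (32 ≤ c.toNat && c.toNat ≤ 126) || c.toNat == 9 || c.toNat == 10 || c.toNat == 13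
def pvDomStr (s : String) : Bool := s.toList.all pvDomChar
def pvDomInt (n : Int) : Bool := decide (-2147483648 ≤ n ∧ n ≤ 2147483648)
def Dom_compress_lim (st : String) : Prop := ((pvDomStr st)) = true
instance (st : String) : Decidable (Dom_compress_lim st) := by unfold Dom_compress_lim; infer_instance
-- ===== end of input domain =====

-- B replaces A's string-keyed dictionary by a trie of integer codes (edges keyed by
-- (prefix code, char code)); same output, a different data structure (objective: alternative).

-- ===== PORT A =====
-- init_dict(): dico[chr(i)] = i for i in range(128)  (alpha_small = False, so start = '\x00').
-- Python str keys are ported as List Char keys (exact: string equality = char-list equality).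
def initDictA : PySem.Dict (List Char) Int :=
  (PySem.List.pyRange 0 128).foldl (fun d i => d.insert [Char.ofNat i.toNat] i) PySem.Dict.empty

-- the for-loop of compress_lim, state (compr, dico, motPartiel).
-- `dico[motPartiel]` is ported as `getD … 0`: within Dom (all chars < 128) the lookup only
-- happens with motPartiel a key of dico, except for st = "" where Python raises KeyError —
-- exactly the inputs Pre_compress_lim excludes.
def lzwLoopA : List Char → List Int → PySem.Dict (List Char) Int → List Char →
    List Int × PySem.Dict (List Char) Int × List Char
  | [], compr, dico, mot => (compr, dico, mot)
  | c :: rest, compr, dico, mot =>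
    if dico.contains (mot ++ [c]) then
      lzwLoopA rest compr dico (mot ++ [c])
    else
      if (dico.size : Int) ≤ 256 then
        lzwLoopA rest (compr ++ [dico.getD mot 0]) (dico.insert (mot ++ [c]) (dico.size : Int)) [c]
      else
        lzwLoopA rest (compr ++ [dico.getD mot 0]) dico [c]

def compress_lim (st : String) : List Int :=
  let r := lzwLoopA st.toList [] initDictA []
  r.1 ++ [r.2.1.getD r.2.2 0]

-- ===== PORT B =====
-- the for-loop of B: state (out, children, next_code, cur); cur = -1 is the trie root.
def lzwLoopB : List Char → List Int → PySem.Dict (Int × Int) Int → Int → Int → List Int × Int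
  | [], out, _children, _next, cur => (out, cur)
  | c :: rest, out, children, next, cur =>
    let ch : Int := (c.toNat : Int)
    match (if cur = -1 ∧ ch < 128 then some ch else children.get? (cur, ch)) with
    | some v => lzwLoopB rest out children next v
    | none =>
      if next ≤ 256 then
        lzwLoopB rest (out ++ [cur]) (children.insert (cur, ch) next) (next + 1) ch
      else
        lzwLoopB rest (out ++ [cur]) children next ch

def compress_lim_alt (st : String) : List Int :=
  let r := lzwLoopB st.toList [] PySem.Dict.empty 128 (-1)
  if r.2 ≠ -1 then r.1 ++ [r.2] else r.1

-- ===== PRECONDITION & SPEC =====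
-- Pre_ excludes exactly the empty string, on which A raises KeyError (dico[""]).
def Pre_compress_lim (st : String) : Prop := st ≠ ""
instance (st : String) : Decidable (Pre_compress_lim st) := by unfold Pre_compress_lim; infer_instance
def pvWitness_compress_lim : String := "aba"

def Spec_compress_lim (st : String) (out : List Int) : Prop := out = compress_lim_alt st
instance (st : String) (out : List Int) : Decidable (Spec_compress_lim st out) := by unfold Spec_compress_lim; infer_instance

-- ===== CLAIM (what is proved, stated in full; the proofs are below) =====
def Claim_equal_compress_lim : Prop := ∀ (st : String), Dom_compress_lim st → Pre_compress_lim st → Spec_compress_lim st (compress_lim st)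

-- ===== LEMMAS AND PROOFS =====

lemma char_toNat_inj {a b : Char} (h : a.toNat = b.toNat) : a = b := by
  apply Char.ext; exact UInt32.toNat_inj.mp h

lemma charOfNat_toNat {n : Nat} (h : n < 128) : (Char.ofNat n).toNat = n := by
  unfold Char.ofNat Char.toNat
  rw [dif_pos (by omega)]
  simp [Char.ofNatAux]

lemma initDictA_items :
    initDictA.items = (List.range 128).map (fun n => ([Char.ofNat n], (n : Int))) := by
  unfold initDictA
  rw [show PySem.List.pyRange 0 128 = (List.range 128).map (fun k => (k : Int)) from
    by exact_mod_cast PySem.List.pyRange_zero_natCast 128]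
  rw [List.foldl_map]
  have h1 : ∀ n ∈ List.range 128, ([Char.ofNat ((n : Int)).toNat] : List Char) = [Char.ofNat n] := by
    intro n _; simp
  have := PySem.Dict.items_foldl_insert_fresh (List.range 128)
      (fun n : Nat => ([Char.ofNat ((n:Int)).toNat] : List Char)) (fun n : Nat => (n : Int))
      PySem.Dict.empty (fun a _ => PySem.Dict.contains_empty _) ?nd
  · simpa using this
  case nd =>
    rw [show (List.map (fun n : Nat => ([Char.ofNat ((n:Int)).toNat] : List Char)) (List.range 128))
        = List.map (fun n : Nat => [Char.ofNat n]) (List.range 128) from List.map_congr_left h1]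
    apply List.Nodup.map_on
    · intro x hx y hy hxy
      simp at hx hy
      have : (Char.ofNat x) = Char.ofNat y := by simpa using hxy
      have := congrArg Char.toNat this
      rwa [charOfNat_toNat hx, charOfNat_toNat hy] at this
    · exact List.nodup_range

lemma initDictA_nodup : initDictA.keys.Nodup := by
  have : initDictA.keys = (List.range 128).map (fun n => ([Char.ofNat n] : List Char)) := by
    show initDictA.items.map (·.1) = _
    rw [initDictA_items, List.map_map]; rfl
  rw [this]
  apply List.Nodup.map_on
  · intro x hx y hy hxy
    simp at hx hy
    have : (Char.ofNat x) = Char.ofNat y := by simpa using hxy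
    have := congrArg Char.toNat this
    rwa [charOfNat_toNat hx, charOfNat_toNat hy] at this
  · exact List.nodup_range

lemma initDictA_get?_iff (w : List Char) (v : Int) :
    initDictA.get? w = some v ↔ ∃ c : Char, w = [c] ∧ c.toNat < 128 ∧ v = (c.toNat : Int) := by
  rw [PySem.Dict.get?_eq_some_iff_mem_items _ _ _ initDictA_nodup, initDictA_items]
  simp only [List.mem_map, List.mem_range, Prod.mk.injEq]
  constructor
  · rintro ⟨n, hn, hw, hv⟩
    exact ⟨Char.ofNat n, hw.symm, by rw [charOfNat_toNat hn]; omega,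
      by rw [charOfNat_toNat hn]; omega⟩
  · rintro ⟨c, hw, hc, hv⟩
    refine ⟨c.toNat, hc, ?_, by omega⟩
    rw [Char.ofNat_toNat, hw]

def LzwInv (dico : PySem.Dict (List Char) Int) (children : PySem.Dict (Int × Int) Int)
    (next : Int) (mot : List Char) (cur : Int) : Prop :=
  dico.get? [] = none ∧
  (∀ c : Char, c.toNat < 128 → dico.get? [c] = some (c.toNat : Int)) ∧
  (dico.size : Int) = next ∧
  ((mot = [] → cur = -1) ∧ (mot ≠ [] → dico.get? mot = some cur)) ∧
  (∀ w c v, w ≠ [] → dico.get? (w ++ [c]) = some v →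
    ∃ p, dico.get? w = some p ∧ children.get? (p, (c.toNat : Int)) = some v) ∧
  (∀ p cc v, children.get? (p, cc) = some v →
    ∃ w c, (c.toNat : Int) = cc ∧ w ≠ [] ∧ dico.get? w = some p ∧ dico.get? (w ++ [c]) = some v) ∧
  (∀ w w' v, dico.get? w = some v → dico.get? w' = some v → w = w') ∧
  (∀ w v, dico.get? w = some v → 0 ≤ v ∧ v < next)

lemma initDictA_Inv : LzwInv initDictA PySem.Dict.empty 128 [] (-1) := by
  refine ⟨?_, ?_, ?_, ⟨fun _ => rfl, fun h => absurd rfl h⟩, ?_, ?_, ?_, ?_⟩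
  · cases h : initDictA.get? [] with
    | none => rfl
    | some v =>
      obtain ⟨c, hc, -, -⟩ := (initDictA_get?_iff _ _).mp h
      simp at hc
  · intro c hc
    exact (initDictA_get?_iff _ _).mpr ⟨c, rfl, hc, rfl⟩
  · show ((initDictA.items.length : Nat) : Int) = 128
    rw [initDictA_items]; simp
  · intro w c v hw hv
    obtain ⟨c', hc', -, -⟩ := (initDictA_get?_iff _ _).mp hv
    exfalso
    have := congrArg List.length hc'
    simp at this
    exact hw this
  · intro p cc v hv
    rw [PySem.Dict.get?_empty] at hv; exact absurd hv (by simp)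
  · intro w w' v h1 h2
    obtain ⟨c, hc, -, hv⟩ := (initDictA_get?_iff _ _).mp h1
    obtain ⟨c', hc', -, hv'⟩ := (initDictA_get?_iff _ _).mp h2
    rw [hc, hc', char_toNat_inj (by omega : c.toNat = c'.toNat)]
  · intro w v hv
    obtain ⟨c, -, hc, hv⟩ := (initDictA_get?_iff _ _).mp hv
    omega

lemma Inv_step_full {dico children next mot cur} (h : LzwInv dico children next mot cur)
    (c : Char) (hc : c.toNat < 128) :
    LzwInv dico children next [c] ((c.toNat : Int)) := by
  obtain ⟨h0, h1, h2, h3, h4, h5, h6, h7⟩ := h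
  exact ⟨h0, h1, h2, ⟨fun h' => absurd h' (by simp), fun _ => h1 c hc⟩, h4, h5, h6, h7⟩

lemma Inv_step_follow {dico children next mot cur} (h : LzwInv dico children next mot cur)
    (c : Char) (v : Int) (hv : dico.get? (mot ++ [c]) = some v) (_hc : c.toNat < 128) :
    LzwInv dico children next (mot ++ [c]) v := by
  obtain ⟨h0, h1, h2, h3, h4, h5, h6, h7⟩ := h
  exact ⟨h0, h1, h2, ⟨fun h' => absurd h' (by simp), fun _ => hv⟩, h4, h5, h6, h7⟩

lemma ne_append_singleton_of_ne_nil {mot : List Char} (c c' : Char) (hmot : mot ≠ []) :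
    ([c'] : List Char) ≠ mot ++ [c] := by
  intro he
  have := congrArg List.length he
  simp at this
  exact hmot this

lemma nil_ne_append_singleton {mot : List Char} (c : Char) :
    ([] : List Char) ≠ mot ++ [c] := by
  intro he
  have := congrArg List.length he
  simp at this

lemma Inv_step_insert {dico : PySem.Dict (List Char) Int} {children : PySem.Dict (Int × Int) Int}
    {next : Int} {mot : List Char} {cur : Int} (h : LzwInv dico children next mot cur)
    (c : Char) (hmot : mot ≠ []) (hnew : dico.get? (mot ++ [c]) = none) (hc : c.toNat < 128) :
    LzwInv (dico.insert (mot ++ [c]) next) (children.insert (cur, (c.toNat : Int)) next)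
      (next + 1) [c] ((c.toNat : Int)) := by
  obtain ⟨h0, h1, h2, h3, h4, h5, h6, h7⟩ := h
  have hcur := h3.2 hmot
  have hcurv := h7 _ _ hcur
  have hmm : mot ≠ mot ++ [c] := by simp
  have hg : ∀ w, (dico.insert (mot ++ [c]) next).get? w
      = if w = mot ++ [c] then some next else dico.get? w :=
    fun w => PySem.Dict.get?_insert dico _ w next
  have hgc : ∀ p cc, (children.insert (cur, (c.toNat : Int)) next).get? (p, cc)
      = if (p, cc) = (cur, (c.toNat : Int)) then some next else children.get? (p, cc) :=
    fun p cc => PySem.Dict.get?_insert children _ _ next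
  refine ⟨?_, ?_, ?_, ⟨fun h' => absurd h' (by simp), fun _ => ?_⟩, ?_, ?_, ?_, ?_⟩
  · rw [hg, if_neg (nil_ne_append_singleton c)]
    exact h0
  · intro c' hc'
    rw [hg, if_neg (ne_append_singleton_of_ne_nil c c' hmot)]
    exact h1 c' hc'
  · rw [PySem.Dict.size_insert, if_neg (by rw [PySem.Dict.contains_eq_isSome_get?, hnew]; simp)]
    push_cast
    omega
  · rw [hg, if_neg (ne_append_singleton_of_ne_nil c c hmot)]
    exact h1 c hc
  · -- I4
    intro w c' v hw hv
    rw [hg] at hv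
    split at hv
    · next heq =>
      obtain ⟨hw', hc''⟩ := List.append_singleton_inj.mp heq
      subst hw' hc''
      refine ⟨cur, ?_, ?_⟩
      · rw [hg, if_neg hmm]; exact hcur
      · rw [hgc, if_pos rfl]; exact hv
    · next hne =>
      obtain ⟨p, hp, hch⟩ := h4 w c' v hw hv
      refine ⟨p, ?_, ?_⟩
      · rw [hg, if_neg (by intro he; rw [he, hnew] at hp; exact absurd hp (by simp))]
        exact hp
      · rw [hgc, if_neg ?_]
        · exact hch
        · intro he
          have hp' : p = cur := congrArg Prod.fst he
          have hc'' : c' = c := char_toNat_inj (Int.natCast_inj.mp (congrArg Prod.snd he))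
          exact hne (by rw [h6 w mot cur (hp' ▸ hp) hcur, hc''])
  · -- I5
    intro p cc v hv
    rw [hgc] at hv
    split at hv
    · next heq =>
      have hp' : p = cur := congrArg Prod.fst heq
      have hcc : cc = (c.toNat : Int) := congrArg Prod.snd heq
      refine ⟨mot, c, hcc.symm, hmot, ?_, ?_⟩
      · rw [hg, if_neg hmm, hp']; exact hcur
      · rw [hg, if_pos rfl]; exact hv
    · next hne =>
      obtain ⟨w, c'', hcc, hw, hwp, hwv⟩ := h5 p cc v hv
      refine ⟨w, c'', hcc, hw, ?_, ?_⟩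
      · rw [hg, if_neg (by intro he; rw [he, hnew] at hwp; exact absurd hwp (by simp))]
        exact hwp
      · rw [hg, if_neg ?_]
        · exact hwv
        · intro he
          obtain ⟨hw', hc''⟩ := List.append_singleton_inj.mp he
          subst hw' hc''
          rw [hwp] at hcur
          have : p = cur := by injection hcur
          exact hne (by rw [this, ← hcc])
  · -- I6
    intro w w' v hvw hvw'
    rw [hg] at hvw hvw'
    split at hvw
    · next heq =>
      split at hvw'
      · next heq' => rw [heq, heq']
      · next =>
        have := h7 _ _ hvw'
        have hv : v = next := by injection hvw with h'; omega
        omega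
    · next =>
      split at hvw'
      · next =>
        have := h7 _ _ hvw
        have hv : v = next := by injection hvw' with h'; omega
        omega
      · next => exact h6 _ _ _ hvw hvw'
  · -- I7
    intro w v hv
    rw [hg] at hv
    split at hv
    · have hv' : v = next := by injection hv with h'; omega
      omega
    · have := h7 _ _ hv
      omega

lemma loop_sim (l : List Char) (compr : List Int) (dico : PySem.Dict (List Char) Int)
    (children : PySem.Dict (Int × Int) Int) (next : Int) (mot : List Char) (cur : Int)
    (hl : ∀ c ∈ l, c.toNat < 128) (hInv : LzwInv dico children next mot cur) :
    (lzwLoopA l compr dico mot).1 = (lzwLoopB l compr children next cur).1 ∧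
    ((l = [] ∧ mot = []) ∨
      ((lzwLoopA l compr dico mot).2.2 ≠ [] ∧
        (lzwLoopA l compr dico mot).2.1.get? (lzwLoopA l compr dico mot).2.2 =
          some (lzwLoopB l compr children next cur).2 ∧
        0 ≤ (lzwLoopB l compr children next cur).2)) := by
  induction l generalizing compr dico children next mot cur with
  | nil =>
    obtain ⟨h0, h1, h2, h3, h4, h5, h6, h7⟩ := hInv
    refine ⟨rfl, ?_⟩
    by_cases hmot : mot = []
    · exact Or.inl ⟨rfl, hmot⟩
    · have hcur := h3.2 hmot
      exact Or.inr ⟨hmot, hcur, (h7 _ _ hcur).1⟩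
  | cons c rest ih =>
    have hch : c.toNat < 128 := hl c (by simp)
    have hrest : ∀ c' ∈ rest, c'.toNat < 128 := fun c' h' => hl c' (by simp [h'])
    obtain ⟨h0, h1, h2, h3, h4, h5, h6, h7⟩ := hInv
    have hInv' : LzwInv dico children next mot cur := ⟨h0, h1, h2, h3, h4, h5, h6, h7⟩
    have goal_of_ih : ∀ (compr' : List Int) dico' children' next' (mot' : List Char) cur',
        mot' ≠ [] → LzwInv dico' children' next' mot' cur' →
        (lzwLoopA rest compr' dico' mot').1 = (lzwLoopB rest compr' children' next' cur').1 ∧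
        ((c :: rest = [] ∧ mot = []) ∨
          ((lzwLoopA rest compr' dico' mot').2.2 ≠ [] ∧
            (lzwLoopA rest compr' dico' mot').2.1.get? (lzwLoopA rest compr' dico' mot').2.2 =
              some (lzwLoopB rest compr' children' next' cur').2 ∧
            0 ≤ (lzwLoopB rest compr' children' next' cur').2)) := by
      intro compr' dico' children' next' mot' cur' hm hI
      obtain ⟨e1, e2⟩ := ih compr' dico' children' next' mot' cur' hrest hI
      refine ⟨e1, Or.inr ?_⟩
      rcases e2 with ⟨-, hmm⟩ | hr
      · exact absurd hmm hm
      · exact hr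
    by_cases hmot : mot = []
    · subst hmot
      have hcurm1 : cur = -1 := h3.1 rfl
      subst hcurm1
      have hcs : dico.get? ([] ++ [c]) = some ((c.toNat : Int)) := by
        rw [List.nil_append]; exact h1 c hch
      have hcont : dico.contains ([] ++ [c]) = true := by
        rw [PySem.Dict.contains_eq_isSome_get?, hcs]; rfl
      show ((lzwLoopA (c :: rest) compr dico []).1 = _) ∧ _
      rw [show lzwLoopA (c :: rest) compr dico [] = lzwLoopA rest compr dico ([] ++ [c]) from
        by rw [lzwLoopA, if_pos hcont]]
      rw [show lzwLoopB (c :: rest) compr children next (-1)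
          = lzwLoopB rest compr children next ((c.toNat : Int)) from by
        have hlt : ((c.toNat : Int)) < 128 := by exact_mod_cast hch
        rw [lzwLoopB]
        simp [hlt]]
      exact goal_of_ih compr dico children next ([] ++ [c]) _ (by simp)
        (Inv_step_follow hInv' c _ hcs hch)
    · have hcur := h3.2 hmot
      have hcur0 := h7 _ _ hcur
      have hcurne : ¬ ((cur = -1) ∧ ((c.toNat : Int)) < 128) := by
        intro h'; omega
      by_cases hcont : dico.contains (mot ++ [c]) = true
      · obtain ⟨v, hv⟩ : ∃ v, dico.get? (mot ++ [c]) = some v := by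
          rw [PySem.Dict.contains_eq_isSome_get?] at hcont
          exact Option.isSome_iff_exists.mp hcont
        have hchild : children.get? (cur, (c.toNat : Int)) = some v := by
          obtain ⟨p, hp, hchp⟩ := h4 mot c v hmot hv
          rw [hp] at hcur
          have : p = cur := by injection hcur
          rwa [this] at hchp
        rw [show lzwLoopA (c :: rest) compr dico mot = lzwLoopA rest compr dico (mot ++ [c]) from
          by rw [lzwLoopA, if_pos hcont]]
        rw [show lzwLoopB (c :: rest) compr children next cur
            = lzwLoopB rest compr children next v from by
          rw [lzwLoopB]; simp only [if_neg hcurne, hchild]]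
        exact goal_of_ih compr dico children next (mot ++ [c]) v (by simp)
          (Inv_step_follow hInv' c v hv hch)
      · have hnone : dico.get? (mot ++ [c]) = none := by
          rw [PySem.Dict.contains_eq_isSome_get?] at hcont
          cases h' : dico.get? (mot ++ [c]) with
          | none => rfl
          | some v => rw [h'] at hcont; simp at hcont
        have hchildn : children.get? (cur, (c.toNat : Int)) = none := by
          cases h' : children.get? (cur, (c.toNat : Int)) with
          | none => rfl
          | some v =>
            obtain ⟨w, c'', hcc, hw, hwp, hwv⟩ := h5 _ _ _ h'
            have hwm : w = mot := h6 w mot cur hwp hcur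
            have hcce : c'' = c := char_toNat_inj (Int.natCast_inj.mp hcc)
            rw [hwm, hcce, hnone] at hwv
            exact absurd hwv (by simp)
        have hgetD : dico.getD mot 0 = cur := PySem.Dict.getD_of_get?_eq_some _ 0 hcur
        by_cases hsz : next ≤ 256
        · rw [show lzwLoopA (c :: rest) compr dico mot
              = lzwLoopA rest (compr ++ [cur]) (dico.insert (mot ++ [c]) next) [c] from by
            rw [lzwLoopA, if_neg hcont, if_pos (by rw [h2]; exact hsz), hgetD, h2]]
          rw [show lzwLoopB (c :: rest) compr children next cur
              = lzwLoopB rest (compr ++ [cur])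
                  (children.insert (cur, (c.toNat : Int)) next) (next + 1) ((c.toNat : Int)) from by
            rw [lzwLoopB]; simp only [if_neg hcurne, hchildn, if_pos hsz]]
          exact goal_of_ih (compr ++ [cur]) _ _ _ [c] _ (by simp)
            (Inv_step_insert hInv' c hmot hnone hch)
        · rw [show lzwLoopA (c :: rest) compr dico mot
              = lzwLoopA rest (compr ++ [cur]) dico [c] from by
            rw [lzwLoopA, if_neg hcont, if_neg (by rw [h2]; exact hsz), hgetD]]
          rw [show lzwLoopB (c :: rest) compr children next cur
              = lzwLoopB rest (compr ++ [cur]) children next ((c.toNat : Int)) from by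
            rw [lzwLoopB]; simp only [if_neg hcurne, hchildn, if_neg hsz]]
          exact goal_of_ih (compr ++ [cur]) _ _ _ [c] _ (by simp)
            (Inv_step_full hInv' c hch)

-- ===== VERDICT (by name: the statement is the Claim_ definition above) =====
theorem compress_lim_spec : Claim_equal_compress_lim := by
  intro st hdom hpre
  unfold Spec_compress_lim compress_lim compress_lim_alt
  have hl : ∀ c ∈ st.toList, c.toNat < 128 := by
    intro c hc
    have h := List.all_eq_true.mp hdom c hc
    simp only [pvDomChar, Bool.or_eq_true, Bool.and_eq_true, decide_eq_true_eq, beq_iff_eq] at h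
    omega
  have hne : st.toList ≠ [] := by intro h0; exact hpre (by simpa using h0)
  obtain ⟨hout, hrest⟩ := loop_sim st.toList [] initDictA PySem.Dict.empty 128 [] (-1) hl initDictA_Inv
  rcases hrest with ⟨h0, -⟩ | ⟨hmne, hget, hpos⟩
  · exact absurd h0 hne
  · show (lzwLoopA st.toList [] initDictA []).1 ++ [(lzwLoopA st.toList [] initDictA []).2.1.getD (lzwLoopA st.toList [] initDictA []).2.2 0] = if (lzwLoopB st.toList [] PySem.Dict.empty 128 (-1)).2 ≠ -1 then (lzwLoopB st.toList [] PySem.Dict.empty 128 (-1)).1 ++ [(lzwLoopB st.toList [] PySem.Dict.empty 128 (-1)).2] else (lzwLoopB st.toList [] PySem.Dict.empty 128 (-1)).1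
    rw [hout, PySem.Dict.getD_of_get?_eq_some _ 0 hget, if_pos (by omega : (lzwLoopB st.toList [] PySem.Dict.empty 128 (-1)).2 ≠ -1)]
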